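-- pv_equiv track=rewrite | github.com/dvdiegoviana/UVA-Solutions | 146.py | getMinPosBiggerThanFirst
-- ===== SOURCE A (Python) =====
-- def getMinPosBiggerThanFirst(arr):
--     min = arr[0]
--     minPos = 0
--     for i in range(len(arr)):
--         if(minPos==0 and arr[i]>arr[0]):
--             minPos=i
--             min = arr[i]
--         if(arr[i]<min and arr[i]>arr[0]):
--             min = arr[i]
--             minPos = i
--     return minPos
-- ===== SOURCE B (Python) =====
-- def getMinPosBiggerThanFirst(arr):
--     first = arr[0]
--     for i in sorted(range(1, len(arr)), key=lambda j: arr[j]):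
--         if arr[i] > first:
--             return i
--     return 0
-- ===== Notes on version B (the rewrite author's own statement) =====
-- stated objective: alternative
-- what changed: Replaces A's fused running-(min,pos) linear scan with sort-then-scan: stably sort the indices 1..n-1 by their value, then return the first sorted index whose value exceeds arr[0] (stability reproduces A's leftmost tie-break), 0 if none qualifies.
import Mathlib
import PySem

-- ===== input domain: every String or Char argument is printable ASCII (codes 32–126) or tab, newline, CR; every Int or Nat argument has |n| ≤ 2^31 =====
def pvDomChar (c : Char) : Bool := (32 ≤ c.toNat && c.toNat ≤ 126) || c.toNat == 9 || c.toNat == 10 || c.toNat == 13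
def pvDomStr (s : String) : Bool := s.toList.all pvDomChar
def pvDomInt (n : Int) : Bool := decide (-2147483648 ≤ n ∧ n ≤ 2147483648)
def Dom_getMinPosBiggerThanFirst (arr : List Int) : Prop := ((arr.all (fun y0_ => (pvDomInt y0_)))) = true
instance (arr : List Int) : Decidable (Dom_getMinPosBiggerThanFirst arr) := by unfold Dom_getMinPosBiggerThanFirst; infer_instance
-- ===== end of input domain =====

-- B replaces A's fused running-(min,pos) linear scan by sort-then-scan: stably sort
-- the candidate indices by value, then take the first one whose value exceeds arr[0]
-- (alternative decomposition, same result; not claimed faster).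


-- ===== PORT A =====
-- literal port of A: running (min, minPos) state over i in range(len(arr));
-- arr[0] on the empty list raises IndexError in Python — excluded by Pre_.
def getMinPosBiggerThanFirst (arr : List Int) : Int :=
  ((PySem.List.pyRange 0 (arr.length : Int) 1).foldl
    (fun (s : Int × Int) i =>
      let x := PySem.List.pyGetD arr i 0
      let a0 := PySem.List.pyGetD arr 0 0
      let s := if s.2 == 0 && decide (a0 < x) then (x, i) else s
      if decide (x < s.1) && decide (a0 < x) then (x, i) else s)
    (PySem.List.pyGetD arr 0 0, 0)).2

-- ===== PORT B =====
-- literal port of B: stable sort of the indices 1..n-1 by value, then the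
-- for-loop with early return becomes find? over the sorted order; 0 if none.
def getMinPosBiggerThanFirst_alt (arr : List Int) : Int :=
  let first := PySem.List.pyGetD arr 0 0
  let order := PySem.List.sorted (PySem.List.pyRange 1 (arr.length : Int) 1)
      (fun j => PySem.List.pyGetD arr j 0)
  match order.find? (fun i => decide (first < PySem.List.pyGetD arr i 0)) with
  | some i => i
  | none => 0

-- ===== PRECONDITION & SPEC =====
-- Pre_ excludes only the empty list, on which Python A raises IndexError at its first subscript.
def Pre_getMinPosBiggerThanFirst (arr : List Int) : Prop := arr ≠ []
instance (arr : List Int) : Decidable (Pre_getMinPosBiggerThanFirst arr) := by unfold Pre_getMinPosBiggerThanFirst; infer_instance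
def pvWitness_getMinPosBiggerThanFirst : List Int := [3, 7, 5, 5, 1]
def Spec_getMinPosBiggerThanFirst (arr : List Int) (out : Int) : Prop := out = getMinPosBiggerThanFirst_alt arr
instance (arr : List Int) (out : Int) : Decidable (Spec_getMinPosBiggerThanFirst arr out) := by unfold Spec_getMinPosBiggerThanFirst; infer_instance

-- ===== CLAIM (what is proved, stated in full; the proofs are below) =====
def Claim_equal_getMinPosBiggerThanFirst : Prop := ∀ (arr : List Int), Dom_getMinPosBiggerThanFirst arr → Pre_getMinPosBiggerThanFirst arr → Spec_getMinPosBiggerThanFirst arr (getMinPosBiggerThanFirst arr)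

-- ===== LEMMAS AND PROOFS =====

-- A's loop body (with arr[0] and the value lookup abstracted to a0 and g)
def pvStepA (a0 : Int) (g : Int → Int) (s : Int × Int) (i : Int) : Int × Int :=
  let x := g i
  let s := if s.2 == 0 && decide (a0 < x) then (x, i) else s
  if decide (x < s.1) && decide (a0 < x) then (x, i) else s

-- the first-extremal accumulator step (min?'s fold body)
def pvMinStep (g : Int → Int) (acc : Option Int) (x : Int) : Option Int :=
  match acc with
  | none => some x
  | some m => if g x < g m then some x else some m

-- pvMinStep guarded by the candidate condition
def pvStepB (a0 : Int) (g : Int → Int) (acc : Option Int) (i : Int) : Option Int :=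
  if decide (a0 < g i) then pvMinStep g acc i else acc

-- the simulation relation between A's state and the Option accumulator
def pvRel (a0 : Int) (g : Int → Int) (s : Int × Int) (acc : Option Int) : Prop :=
  (acc = none ∧ s = (a0, 0)) ∨ (∃ j, acc = some j ∧ s = (g j, j) ∧ a0 < g j ∧ 1 ≤ j)

lemma pvRel_step (a0 : Int) (g : Int → Int) (i : Int) (hi : 1 ≤ i)
    (s : Int × Int) (acc : Option Int) (h : pvRel a0 g s acc) :
    pvRel a0 g (pvStepA a0 g s i) (pvStepB a0 g acc i) := by
  rcases h with ⟨hn, hs⟩ | ⟨j, hj, hs, hgt, hj1⟩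
  · subst hn hs
    by_cases hlt : a0 < g i
    · right; exact ⟨i, by simp [pvStepB, pvMinStep, hlt], by simp [pvStepA, hlt], hlt, hi⟩
    · left; simp [pvStepA, pvStepB, hlt]
  · subst hj hs
    have hj0 : (j == (0 : Int)) = false := by simp; omega
    by_cases hlt : a0 < g i
    · by_cases hlt2 : g i < g j
      · right; exact ⟨i, by simp [pvStepB, pvMinStep, hlt, hlt2], by simp [pvStepA, hj0, hlt, hlt2], hlt, hi⟩
      · right; exact ⟨j, by simp [pvStepB, pvMinStep, hlt, hlt2], by simp [pvStepA, hj0, hlt, hlt2], hgt, hj1⟩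
    · right
      refine ⟨j, by simp [pvStepB, hlt], ?_, hgt, hj1⟩
      simp [pvStepA, hj0, hlt]

lemma pvRel_foldl (a0 : Int) (g : Int → Int) (L : List Int) (hL : ∀ i ∈ L, 1 ≤ i)
    (s : Int × Int) (acc : Option Int) (h : pvRel a0 g s acc) :
    pvRel a0 g (L.foldl (pvStepA a0 g) s) (L.foldl (pvStepB a0 g) acc) := by
  induction L generalizing s acc with
  | nil => exact h
  | cons i t ih =>
    exact ih (fun x hx => hL x (List.mem_cons_of_mem _ hx)) _ _
      (pvRel_step a0 g i (hL i (List.mem_cons_self)) s acc h)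

-- inserting a non-candidate never changes the first candidate found
lemma find?_insertBy_of_neg (g : Int → Int) (p : Int → Bool) (x : Int) (s : List Int)
    (hx : p x = false) :
    (PySem.List.insertBy (fun a b => decide (g a < g b)) x s).find? p = s.find? p := by
  induction s with
  | nil => simp [PySem.List.insertBy, hx]
  | cons y ys ih =>
    by_cases h : g x < g y
    · simp [PySem.List.insertBy, h, List.find?_cons, hx]
    · simp only [PySem.List.insertBy, decide_eq_true_eq, h, if_false]
      cases hy : p y with
      | true => simp [hy]
      | false => simp only [List.find?_cons, hy, ih]

-- inserting a candidate into a key-sorted list updates the first candidate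
-- found exactly as the first-extremal accumulator step would
lemma find?_insertBy_of_pos (g : Int → Int) (p : Int → Bool) (x : Int) (s : List Int)
    (hs : s.Pairwise (fun a b => g a ≤ g b)) (hx : p x = true) :
    (PySem.List.insertBy (fun a b => decide (g a < g b)) x s).find? p =
      pvMinStep g (s.find? p) x := by
  induction s with
  | nil => simp [PySem.List.insertBy, pvMinStep, hx]
  | cons y ys ih =>
    rcases List.pairwise_cons.mp hs with ⟨hy, hys⟩
    by_cases h : g x < g y
    · simp only [PySem.List.insertBy, decide_eq_true_eq, h, if_true]
      rw [List.find?_cons_of_pos hx]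
      cases hfy : (y :: ys).find? p with
      | none => simp [pvMinStep]
      | some m =>
        have hm : g y ≤ g m := by
          rcases List.mem_cons.mp (List.mem_of_find?_eq_some hfy) with rfl | hm
          · exact le_refl _
          · exact hy m hm
        simp [pvMinStep, lt_of_lt_of_le h hm]
    · simp only [PySem.List.insertBy, decide_eq_true_eq, h, if_false]
      cases hyp : p y with
      | true =>
        rw [List.find?_cons_of_pos hyp, List.find?_cons_of_pos hyp]
        simp [pvMinStep, h]
      | false =>
        rw [List.find?_cons_of_neg (by simp [hyp]), List.find?_cons_of_neg (by simp [hyp])]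
        exact ih hys

-- a step-by-step sorted: sorted (L ++ [x]) inserts x into sorted L
lemma sorted_append_singleton (L : List Int) (x : Int) (g : Int → Int) :
    PySem.List.sorted (L ++ [x]) g =
      PySem.List.insertBy (fun a b => decide (g a < g b)) x (PySem.List.sorted L g) := by
  simp [PySem.List.sorted, List.foldl_append]

-- the first candidate of the stable-sorted list is the first-extremal fold
-- over the candidates in original order
lemma find?_sorted_eq_foldl_filter (g : Int → Int) (p : Int → Bool) (L : List Int) :
    (PySem.List.sorted L g).find? p = (L.filter p).foldl (pvMinStep g) none := by
  induction L using List.reverseRecOn with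
  | nil => simp [PySem.List.sorted]
  | append_singleton L x ih =>
    rw [sorted_append_singleton, List.filter_append, List.foldl_append]
    cases hx : p x with
    | true =>
      rw [find?_insertBy_of_pos g p x _ (PySem.List.sorted_pairwise L g) hx, ih]
      simp [hx]
    | false =>
      rw [find?_insertBy_of_neg g p x _ hx, ih]
      simp [hx]

-- ===== VERDICT (by name: the statement is the Claim_ definition above) =====
theorem getMinPosBiggerThanFirst_spec : Claim_equal_getMinPosBiggerThanFirst := by
  intro arr _ hpre
  unfold Spec_getMinPosBiggerThanFirst getMinPosBiggerThanFirst getMinPosBiggerThanFirst_alt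
  have hlen : (1 : Int) ≤ (arr.length : Int) := by
    have : arr.length ≠ 0 := fun h => hpre (List.eq_nil_of_length_eq_zero h)
    omega
  set a0 := PySem.List.pyGetD arr 0 0 with ha0
  set g : Int → Int := fun i => PySem.List.pyGetD arr i 0 with hg
  set p : Int → Bool := fun i => decide (a0 < g i) with hp
  have hfoldA : ∀ (L : List Int) (s : Int × Int), L.foldl
      (fun (s : Int × Int) i =>
        let x := PySem.List.pyGetD arr i 0
        let a0 := PySem.List.pyGetD arr 0 0
        let s := if s.2 == 0 && decide (a0 < x) then (x, i) else s
        if decide (x < s.1) && decide (a0 < x) then (x, i) else s) s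
      = L.foldl (pvStepA a0 g) s := by
    intro L s; rfl
  -- split off the i = 0 step, which leaves the initial state unchanged
  rw [PySem.List.pyRange_one_append 0 1 (arr.length : Int) (by omega) hlen]
  have h01 : PySem.List.pyRange 0 1 1 = [0] := by decide
  rw [h01, List.foldl_append, hfoldA, hfoldA]
  have hzero : List.foldl (pvStepA a0 g) (a0, 0) [0] = (a0, 0) := by
    have hga : g 0 = a0 := rfl
    simp [pvStepA, hga]
  rw [hzero]
  -- B's side: find? over the stable sort is the guarded fold over 1..n-1
  show _ = (match (PySem.List.sorted (PySem.List.pyRange 1 (arr.length : Int) 1) g).find? p with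
    | some i => i
    | none => (0 : Int))
  rw [find?_sorted_eq_foldl_filter g p, ← PySem.List.foldl_if_eq_foldl_filter p (pvMinStep g)]
  have hstep : (PySem.List.pyRange 1 (arr.length : Int) 1).foldl
      (fun acc x => if p x then pvMinStep g acc x else acc) none
      = (PySem.List.pyRange 1 (arr.length : Int) 1).foldl (pvStepB a0 g) none := rfl
  rw [hstep]
  have hrel := pvRel_foldl a0 g (PySem.List.pyRange 1 (arr.length : Int) 1)
    (fun i hi => (PySem.List.mem_pyRange_one.mp hi).1) (a0, 0) none (Or.inl ⟨rfl, rfl⟩)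
  rcases hrel with ⟨hn, hs⟩ | ⟨j, hj, hs, _, _⟩
  · rw [hs, hn]
  · rw [hs, hj]
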